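-- pv_equiv track=rewrite | github.com/MoralesTomas/-LFP-Proyecto1_2S2021 | datos/imagen.py | automataCorchete
-- ===== SOURCE A (Python) =====
-- def automataCorchete(celdas):
--     actual = ""
--     estado = 0
--     lista = []
--     for i in celdas:
--         if estado == 0:
--             if i =="]":
--                 estado =1
--                 actual += "]"
--                 continue
--             else:
--                 actual += i
--                 continue
--         if estado == 1:
--             if i ==",":
--                 lista.append(actual)
--                 actual = ""
--                 estado = 0
--                 continue
--     lista.append(actual)
--     return lista
-- ===== SOURCE B (Python) =====
-- def automataCorchete(celdas):
--     # find/slice scanner: grab through the first ']', then drop through the next ','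
--     res = []
--     s = celdas
--     while True:
--         p = s.find(']')
--         if p == -1:
--             res.append(s)
--             return res
--         res.append(s[:p + 1])
--         s = s[p + 1:]
--         c = s.find(',')
--         if c == -1:
--             return res
--         s = s[c + 1:]
-- ===== Notes on version B (the rewrite author's own statement) =====
-- stated objective: faster
-- what changed: Replaced the per-character state machine (explicit estado variable, character-by-character accumulation) with a find/slice scanner that jumps to the next closing bracket and the next comma and slices out whole tokens.
import Mathlib
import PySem

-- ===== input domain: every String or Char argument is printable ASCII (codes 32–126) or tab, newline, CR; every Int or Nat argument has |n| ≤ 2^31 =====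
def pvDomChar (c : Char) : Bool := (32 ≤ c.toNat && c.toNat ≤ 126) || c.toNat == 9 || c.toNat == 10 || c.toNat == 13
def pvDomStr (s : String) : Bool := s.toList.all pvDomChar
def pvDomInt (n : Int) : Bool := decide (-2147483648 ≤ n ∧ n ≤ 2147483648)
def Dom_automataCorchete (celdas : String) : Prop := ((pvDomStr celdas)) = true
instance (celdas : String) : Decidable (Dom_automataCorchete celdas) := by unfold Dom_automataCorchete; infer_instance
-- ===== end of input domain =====

-- B replaces A's per-character state machine with a find/slice scanner over whole tokens (measured faster by a constant factor).

-- ===== PORT A =====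
-- state = ((actual, estado), lista), exactly A's three variables
def aStep (st : (String × Int) × List String) (i : Char) : (String × Int) × List String :=
  let actual := st.1.1
  let estado := st.1.2
  let lista := st.2
  if estado = 0 then
    if i = ']' then ((actual.push ']', 1), lista)
    else ((actual.push i, estado), lista)
  else if estado = 1 then
    if i = ',' then (("", 0), lista ++ [actual])
    else st
  else st

def automataCorchete (celdas : String) : List String :=
  let st := celdas.toList.foldl aStep (("", 0), [])
  st.2 ++ [st.1.1]

-- ===== PORT B =====
-- Source B's while-loop as a recursion on the remaining string; Chars.find/Chars.slice on
-- s.toList are exactly Python's str.find / slicing (PySem.Str wrappers are these on toList).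
def bLoop (res : List String) (s : List Char) : List String :=
  let p := PySem.Chars.find s [']']
  if hp : p = -1 then res ++ [String.ofList s]
  else
    let res' := res ++ [String.ofList (PySem.Chars.slice s none (some (p + 1)))]
    let s' := PySem.Chars.slice s (some (p + 1)) none
    let c := PySem.Chars.find s' [',']
    if c = -1 then res'
    else bLoop res' (PySem.Chars.slice s' (some (c + 1)) none)
termination_by s.length
decreasing_by
  rename_i hc
  have hc' : ¬ PySem.Chars.find (PySem.Chars.slice s (some (PySem.Chars.find s [']'] + 1))) [','] = -1 := hc
  have hp0 : 0 ≤ PySem.Chars.find s [']'] := by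
    have := PySem.Chars.neg_one_le_find s [']']
    omega
  have hc0 : 0 ≤ PySem.Chars.find (PySem.Chars.slice s (some (PySem.Chars.find s [']'] + 1))) [','] := by
    have := PySem.Chars.neg_one_le_find (PySem.Chars.slice s (some (PySem.Chars.find s [']'] + 1))) [',']
    omega
  have hne : 1 ≤ s.length := by
    rcases s with _ | ⟨a, t⟩
    · exact absurd (by decide) hp
    · simp
  show (PySem.Chars.slice (PySem.Chars.slice s (some (PySem.Chars.find s [']'] + 1)))
      (some (PySem.Chars.find (PySem.Chars.slice s (some (PySem.Chars.find s [']'] + 1))) [','] + 1))).length < s.length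
  simp only [PySem.Chars.slice_eq_listSlice] at hc0 ⊢
  have e1 : PySem.List.slice s (some (PySem.Chars.find s [']'] + 1))
      = s.drop (PySem.Chars.find s [']'] + 1).toNat := PySem.List.slice_from s (by omega)
  rw [e1] at hc0 ⊢
  have e2 : PySem.List.slice (s.drop (PySem.Chars.find s [']'] + 1).toNat)
        (some (PySem.Chars.find (s.drop (PySem.Chars.find s [']'] + 1).toNat) [','] + 1))
      = (s.drop (PySem.Chars.find s [']'] + 1).toNat).drop
          (PySem.Chars.find (s.drop (PySem.Chars.find s [']'] + 1).toNat) [','] + 1).toNat :=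
    PySem.List.slice_from _ (by omega)
  rw [e2]
  simp only [List.length_drop]
  omega

def automataCorchete_alt (celdas : String) : List String :=
  bLoop [] celdas.toList

-- ===== PRECONDITION & SPEC =====
def Spec_automataCorchete (celdas : String) (out : List String) : Prop := out = automataCorchete_alt celdas
instance (celdas : String) (out : List String) : Decidable (Spec_automataCorchete celdas out) := by unfold Spec_automataCorchete; infer_instance

-- ===== CLAIM (what is proved, stated in full; the proofs are below) =====
def Claim_equal_automataCorchete : Prop := ∀ (celdas : String), Dom_automataCorchete celdas → Spec_automataCorchete celdas (automataCorchete celdas)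

-- ===== LEMMAS AND PROOFS =====

-- The common token list both programs compute: accumulate until ']', then skip until ','.
mutual
def runTok (acc : List Char) : List Char → List (List Char)
  | [] => [acc]
  | c :: r => if c = ']' then runSkip (acc ++ [']']) r else runTok (acc ++ [c]) r
def runSkip (tok : List Char) : List Char → List (List Char)
  | [] => [tok]
  | c :: r => if c = ',' then tok :: runTok [] r else runSkip tok r
end

-- A's fold from either state yields runTok / runSkip
lemma aFold_run (l : List Char) :
    (∀ acc lista,
      (let st := l.foldl aStep ((String.ofList acc, 0), lista); st.2 ++ [st.1.1])
        = lista ++ (runTok acc l).map String.ofList) ∧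
    (∀ tok lista,
      (let st := l.foldl aStep ((String.ofList tok, 1), lista); st.2 ++ [st.1.1])
        = lista ++ (runSkip tok l).map String.ofList) := by
  induction l with
  | nil => simp [runTok, runSkip]
  | cons c r ih =>
    constructor
    · intro acc lista
      by_cases hc : c = ']'
      · subst hc
        have hpush : (String.ofList acc).push ']' = String.ofList (acc ++ [']']) := by
          apply String.toList_inj.mp; simp
        simp only [List.foldl_cons, aStep, runTok, hpush]
        norm_num
        simpa using ih.2 (acc ++ [']']) lista
      · have hpush : (String.ofList acc).push c = String.ofList (acc ++ [c]) := by
          apply String.toList_inj.mp; simp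
        simp only [List.foldl_cons, aStep, runTok, hpush]
        norm_num [hc]
        simpa [hc] using ih.1 (acc ++ [c]) lista
    · intro tok lista
      by_cases hc : c = ','
      · subst hc
        simp only [List.foldl_cons, aStep, runSkip]
        norm_num
        have h0 : ("" : String) = String.ofList [] := rfl
        rw [h0]
        simpa using ih.1 [] (lista ++ [String.ofList tok])
      · simp only [List.foldl_cons, aStep, runSkip]
        norm_num [hc]
        simpa [hc] using ih.2 tok lista

lemma singleton_prefix_iff {x : Char} {l : List Char} : [x] <+: l ↔ ∃ t, l = x :: t := by
  constructor
  · rintro ⟨t, rfl⟩; exact ⟨t, rfl⟩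
  · rintro ⟨t, rfl⟩; exact ⟨t, rfl⟩

-- minimality of find transfers to "not in the prefix"
lemma not_mem_take_of_min {x : Char} {l : List Char} {k : Nat}
    (h : ∀ i < k, ¬ [x] <+: l.drop i) : x ∉ l.take k := by
  intro hmem
  obtain ⟨j, hj, hget⟩ := List.getElem_of_mem hmem
  have hjk : j < k := lt_of_lt_of_le hj (by simpa using List.length_take_le (l := l) (n := k))
  have hjl : j < l.length := by
    have := hj
    simp [List.length_take] at this
    omega
  apply h j hjk
  rw [singleton_prefix_iff]
  refine ⟨l.drop (j + 1), ?_⟩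
  have hx : l[j]'hjl = x := by
    rw [← hget]
    exact List.getElem_take.symm
  rw [List.drop_eq_getElem_cons hjl, hx]

-- decompose s at the first occurrence of x when find succeeds
lemma find_decomp {x : Char} {s : List Char}
    (h : PySem.Chars.find s [x] ≠ -1) :
    0 ≤ PySem.Chars.find s [x] ∧
    x ∉ s.take (PySem.Chars.find s [x]).toNat ∧
    s = s.take (PySem.Chars.find s [x]).toNat ++ x :: s.drop ((PySem.Chars.find s [x]).toNat + 1) := by
  have hge : 0 ≤ PySem.Chars.find s [x] := by
    have := PySem.Chars.neg_one_le_find s [x]; omega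
  obtain ⟨hpre, hmin⟩ := PySem.Chars.find_spec (s := s) (sub := [x]) hge
  obtain ⟨t, ht⟩ := singleton_prefix_iff.mp hpre
  refine ⟨hge, not_mem_take_of_min hmin, ?_⟩
  conv_lhs => rw [← List.take_append_drop ((PySem.Chars.find s [x]).toNat) s]
  rw [ht]
  congr 1
  have : s.drop ((PySem.Chars.find s [x]).toNat + 1) = (s.drop (PySem.Chars.find s [x]).toNat).tail := by
    rw [← List.drop_drop]; simp
  rw [this, ht]
  rfl

lemma runTok_no_br {l : List Char} (h : ']' ∉ l) (acc : List Char) :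
    runTok acc l = [acc ++ l] := by
  induction l generalizing acc with
  | nil => simp [runTok]
  | cons c r ih =>
    simp only [List.mem_cons, not_or] at h
    have hc : ¬ c = ']' := fun e => h.1 e.symm
    simp [runTok, hc, ih h.2]

lemma runSkip_no_comma {l : List Char} (h : ',' ∉ l) (tok : List Char) :
    runSkip tok l = [tok] := by
  induction l with
  | nil => simp [runSkip]
  | cons c r ih =>
    simp only [List.mem_cons, not_or] at h
    have hc : ¬ c = ',' := fun e => h.1 e.symm
    simp [runSkip, hc, ih h.2]

lemma runTok_br {t : List Char} (h : ']' ∉ t) (acc r : List Char) :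
    runTok acc (t ++ ']' :: r) = runSkip (acc ++ t ++ [']']) r := by
  induction t generalizing acc with
  | nil => simp [runTok]
  | cons c m ih =>
    simp only [List.mem_cons, not_or] at h
    have hc : ¬ c = ']' := fun e => h.1 e.symm
    simp [runTok, hc, ih h.2, List.append_assoc]

lemma runSkip_comma {m : List Char} (h : ',' ∉ m) (tok r : List Char) :
    runSkip tok (m ++ ',' :: r) = tok :: runTok [] r := by
  induction m with
  | nil => simp [runSkip]
  | cons c m' ih =>
    simp only [List.mem_cons, not_or] at h
    have hc : ¬ c = ',' := fun e => h.1 e.symm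
    simp [runSkip, hc, ih h.2]

lemma find_not_mem {x : Char} {s : List Char}
    (hp : PySem.Chars.find s [x] = -1) : x ∉ s := by
  intro hm
  exact (PySem.Chars.find_eq_neg_one_iff s [x]).mp hp
    ((List.singleton_infix_iff x s).mpr hm)

lemma take_first {x : Char} {s : List Char} {k : Nat}
    (hdec : s = s.take k ++ x :: s.drop (k + 1)) :
    s.take (k + 1) = s.take k ++ [x] := by
  have hklt : k < s.length := by
    by_contra hcon
    push_neg at hcon
    have h1 : s.take k = s := List.take_of_length_le hcon
    have : s.length = s.length + (x :: s.drop (k + 1)).length := by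
      conv_lhs => rw [hdec, List.length_append, h1]
    simp at this
  conv_lhs => rw [hdec]
  rw [List.take_append]
  have hlen : (s.take k).length = k := by simp [List.length_take]; omega
  rw [List.take_of_length_le (by omega), hlen]
  simp

lemma bLoop_run_aux (n : Nat) : ∀ (s : List Char), s.length ≤ n → ∀ (res : List String),
    bLoop res s = res ++ (runTok [] s).map String.ofList := by
  induction n with
  | zero =>
    intro s hs res
    have : s = [] := List.eq_nil_of_length_eq_zero (by omega)
    subst this
    unfold bLoop
    have h0 : PySem.Chars.find ([] : List Char) [']'] = -1 := by decide
    simp [h0, runTok]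
  | succ n ih =>
    intro s hs res
    unfold bLoop
    by_cases hp : PySem.Chars.find s [']'] = -1
    · rw [dif_pos hp]
      rw [runTok_no_br (find_not_mem hp)]
      simp
    · rw [dif_neg hp]
      obtain ⟨hge, hnt, hdec⟩ := find_decomp hp
      set p := PySem.Chars.find s [']'] with hpdef
      set t := s.take p.toNat with htdef
      set r := s.drop (p.toNat + 1) with hrdef
      have hslice1 : PySem.Chars.slice s none (some (p + 1)) = s.take (p.toNat + 1) := by
        simp only [PySem.Chars.slice_eq_listSlice]
        rw [PySem.List.slice_to s (b := p + 1) (by omega)]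
        congr 1; omega
      have hslice2 : PySem.Chars.slice s (some (p + 1)) none = r := by
        simp only [PySem.Chars.slice_eq_listSlice]
        rw [PySem.List.slice_from s (a := p + 1) (by omega)]
        rw [hrdef]; congr 1; omega
      have htake : s.take (p.toNat + 1) = t ++ [']'] := take_first hdec
      have hrlen : r.length + 1 ≤ s.length := by
        have := congrArg List.length hdec
        simp only [List.length_append, List.length_cons] at this
        omega
      have hruns : runTok [] s = runSkip (t ++ [']']) r := by
        conv_lhs => rw [hdec]
        rw [runTok_br hnt]
        simp
      rw [hslice1, hslice2, htake, hruns]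
      by_cases hc : PySem.Chars.find r [','] = -1
      · rw [if_pos hc]
        rw [runSkip_no_comma (find_not_mem hc)]
        simp
      · rw [if_neg hc]
        obtain ⟨hcge, hcnt, hcdec⟩ := find_decomp hc
        set c := PySem.Chars.find r [','] with hcdef
        set r2 := r.drop (c.toNat + 1) with hr2def
        have hslice3 : PySem.Chars.slice r (some (c + 1)) none = r2 := by
          simp only [PySem.Chars.slice_eq_listSlice]
          rw [PySem.List.slice_from r (a := c + 1) (by omega)]
          rw [hr2def]; congr 1; omega
        have hrunr : runSkip (t ++ [']']) r = (t ++ [']']) :: runTok [] r2 := by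
          conv_lhs => rw [hcdec]
          rw [runSkip_comma hcnt]
        have hr2len : r2.length ≤ n := by
          rw [hr2def]
          have := List.length_drop (l := r) (i := c.toNat + 1)
          omega
        rw [hslice3, hrunr, ih r2 hr2len]
        simp

lemma bLoop_run (s : List Char) (res : List String) :
    bLoop res s = res ++ (runTok [] s).map String.ofList :=
  bLoop_run_aux s.length s le_rfl res

-- ===== VERDICT (by name: the statement is the Claim_ definition above) =====
theorem automataCorchete_spec : Claim_equal_automataCorchete := by
  intro celdas _
  unfold Spec_automataCorchete automataCorchete automataCorchete_alt
  rw [bLoop_run]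
  have h := (aFold_run celdas.toList).1 [] []
  simpa using h
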